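-- pv_equiv track=rewrite | github.com/ditrungduong/OSU- | List Max/list_max.py | rec_list_max
-- ===== SOURCE A (Python) =====
-- def rec_list_max(num_list, max_num, pos=0):
--     """Return the max number in the list using recursive"""
--     if len(num_list) == 1:
--         return max_num
--     if pos == len(num_list):
--         return max_num
--     if max_num > num_list[0]:
--         return rec_list_max(num_list[1:], max_num, pos)
--     else:
--         return rec_list_max(num_list[1:], num_list[0], pos)
-- ===== SOURCE B (Python) =====
-- def rec_list_max(num_list, max_num, pos=0):
--     """Return the max number in the list using an iterative loop (same stopping rule)."""
--     best = max_num
--     remaining = len(num_list)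
--     i = 0
--     while remaining != 1 and remaining != pos:
--         x = num_list[i]
--         if x >= best:
--             best = x
--         i += 1
--         remaining -= 1
--     return best
-- ===== Notes on version B (the rewrite author's own statement) =====
-- stated objective: faster
-- what changed: Replaces the recursion that copies the tail num_list[1:] at every step with a single in-place index loop threading the running max, keeping the same two stopping rules (remaining==1 or remaining==pos).
-- outside the precondition, e.g. on rec_list_max([], 5, 3): A raises IndexError, B raises IndexError
import Mathlib
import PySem

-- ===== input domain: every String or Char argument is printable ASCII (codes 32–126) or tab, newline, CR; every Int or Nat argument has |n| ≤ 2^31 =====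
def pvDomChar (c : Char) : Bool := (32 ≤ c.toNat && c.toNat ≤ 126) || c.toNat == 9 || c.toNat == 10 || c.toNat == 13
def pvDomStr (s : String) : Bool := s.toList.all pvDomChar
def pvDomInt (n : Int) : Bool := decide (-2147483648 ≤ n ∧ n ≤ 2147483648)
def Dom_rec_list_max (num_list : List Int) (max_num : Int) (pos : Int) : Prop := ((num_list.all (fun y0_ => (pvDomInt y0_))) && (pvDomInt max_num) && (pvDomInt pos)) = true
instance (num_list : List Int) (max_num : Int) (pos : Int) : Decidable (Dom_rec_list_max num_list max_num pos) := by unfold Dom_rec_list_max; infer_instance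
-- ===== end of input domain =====

-- B replaces A's tail-copying recursion by an index loop with the same running max and
-- the same two stopping rules; objective: faster (no per-step list copy).

-- ===== PORT A =====
-- literal transliteration of A's recursion; `num_list[1:]` = rest, `num_list[0]` = x
def rec_list_max (num_list : List Int) (max_num : Int) (pos : Int) : Int :=
  if num_list.length = 1 then max_num
  else if pos = (num_list.length : Int) then max_num
  else match num_list with
    | [] => 0  -- Python raises IndexError (num_list[0]) here; excluded by Pre_
    | x :: rest =>
      if max_num > x then rec_list_max rest max_num pos
      else rec_list_max rest x pos

-- ===== PORT B =====
-- the while loop, recursing on `remaining`; `num_list[i]` is in range whenever the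
-- body runs on an input satisfying Pre_, so the .getD 0 default is never used there
def rec_list_max_altLoop (num_list : List Int) (pos : Int) : Nat → Nat → Int → Int
  | 0, _, best => best       -- loop condition: Python raises here iff pos ≠ 0 (excluded by Pre_)
  | 1, _, best => best
  | (r+2), i, best =>
      if ((r : Int) + 2) = pos then best
      else
        let x := (PySem.List.pyGet? num_list (i : Int)).getD 0
        rec_list_max_altLoop num_list pos (r+1) (i+1) (if x ≥ best then x else best)

def rec_list_max_alt (num_list : List Int) (max_num : Int) (pos : Int) : Int :=
  rec_list_max_altLoop num_list pos num_list.length 0 max_num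

-- ===== PRECONDITION & SPEC =====
-- Pre_ excludes exactly the inputs on which both Pythons raise IndexError:
-- the empty list with pos ≠ 0.
def Pre_rec_list_max (num_list : List Int) (max_num : Int) (pos : Int) : Prop :=
  num_list ≠ [] ∨ pos = 0
instance (num_list : List Int) (max_num : Int) (pos : Int) : Decidable (Pre_rec_list_max num_list max_num pos) := by unfold Pre_rec_list_max; infer_instance

def pvWitness_rec_list_max : List Int × Int × Int := ([3, 7, 2], 0, 0)

def Spec_rec_list_max (num_list : List Int) (max_num : Int) (pos : Int) (out : Int) : Prop := out = rec_list_max_alt num_list max_num pos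
instance (num_list : List Int) (max_num : Int) (pos : Int) (out : Int) : Decidable (Spec_rec_list_max num_list max_num pos out) := by unfold Spec_rec_list_max; infer_instance

-- ===== CLAIM (what is proved, stated in full; the proofs are below) =====
def Claim_equal_rec_list_max : Prop := ∀ (num_list : List Int) (max_num : Int) (pos : Int), Dom_rec_list_max num_list max_num pos → Pre_rec_list_max num_list max_num pos → Spec_rec_list_max num_list max_num pos (rec_list_max num_list max_num pos)

-- ===== LEMMAS AND PROOFS =====

-- loop invariant: with remaining = l.length - i (and i < l.length), the loop computes
-- exactly A's recursion on the suffix l.drop i with the running max as accumulator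
theorem altLoop_eq_rec (l : List Int) (pos : Int) :
    ∀ (n i : Nat) (best : Int), i < l.length → n = l.length - i →
      rec_list_max_altLoop l pos n i best = rec_list_max (l.drop i) best pos :=
  by
  intro n
  induction n with
  | zero => intro i best hi hn; omega
  | succ r ih =>
    intro i best hi hn
    match r, hn, ih with
    | 0, hn, _ =>
      have hlen : (l.drop i).length = 1 := by simp; omega
      rw [rec_list_max_altLoop, rec_list_max.eq_def]
      simp [hlen]
    | Nat.succ r', hn, ih =>
      have hlen : (l.drop i).length = r' + 2 := by simp; omega
      have hi1 : i + 1 < l.length := by omega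
      have hdrop : l.drop i = l[i] :: l.drop (i + 1) := List.drop_eq_getElem_cons hi
      rw [rec_list_max_altLoop, rec_list_max.eq_def, hdrop]
      have hget : (PySem.List.pyGet? l (i : Int)).getD 0 = l[i] := by
        simp [PySem.List.pyGet?_natCast, List.getElem?_eq_getElem hi]
      rw [hget]
      have hlen2 : (l[i] :: l.drop (i + 1)).length = r' + 2 := by
        rw [← hdrop]; exact hlen
      rw [hlen2]
      by_cases hp : ((r' : Int) + 2) = pos
      · have hc : pos = ((r' + 2 : Nat) : Int) := by push_cast; omega
        rw [if_pos hp, if_neg (by omega : ¬ r' + 2 = 1), if_pos hc]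
      · have hc : ¬ pos = ((r' + 2 : Nat) : Int) := by push_cast; omega
        rw [if_neg hp, if_neg (by omega : ¬ r' + 2 = 1), if_neg hc]
        have key := ih (i + 1) (if l[i] ≥ best then l[i] else best) hi1 (by omega)
        show rec_list_max_altLoop l pos (r' + 1) (i + 1) (if l[i] ≥ best then l[i] else best)
            = if best > l[i] then rec_list_max (List.drop (i + 1) l) best pos
              else rec_list_max (List.drop (i + 1) l) l[i] pos
        rw [show r' + 1 = r'.succ from rfl, key]
        by_cases hb : best > l[i]
        · rw [if_neg (by omega : ¬ l[i] ≥ best), if_pos hb]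
        · rw [if_pos (by omega : l[i] ≥ best), if_neg hb]

theorem rec_list_max_spec' : ∀ (num_list : List Int) (max_num : Int) (pos : Int),
    Pre_rec_list_max num_list max_num pos →
    rec_list_max num_list max_num pos = rec_list_max_alt num_list max_num pos := by
  intro l m p hp
  cases l with
  | nil =>
    rcases hp with h | h
    · exact absurd rfl h
    · simp [rec_list_max, rec_list_max_alt, rec_list_max_altLoop, h]
  | cons x xs =>
    have h := altLoop_eq_rec (x :: xs) p (x :: xs).length 0 m (by simp) (by simp)
    simp only [List.drop_zero] at h
    simpa [rec_list_max_alt] using h.symm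

-- ===== VERDICT (by name: the statement is the Claim_ definition above) =====
theorem rec_list_max_spec : Claim_equal_rec_list_max := by
  intro l m p _ hpre
  exact rec_list_max_spec' l m p hpre
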